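-- pv_equiv track=rewrite | github.com/orb-277/Smart-Scheduler | Scheduler/Scheduler_v1.py | group_into_area
-- ===== SOURCE A (Python) =====
-- def group_into_area(scrambled_soc_lists:tuple)->dict[str:list]:
--     area_dict  =  { }
--     for society in scrambled_soc_lists:
--         if society[4].lower().strip() not in area_dict.keys():
--             area_dict[society[4].lower().strip()] = [society]
--         else:
--             area_dict[society[4].lower().strip()].append(society)
--     return area_dict
-- ===== SOURCE B (Python) =====
-- def group_into_area(scrambled_soc_lists):
--     # One pass to normalize keys, then build each group by a per-key scan,
--     # keys kept in first-appearance order (matching dict insertion order).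
--     pairs = [(society[4].lower().strip(), society) for society in scrambled_soc_lists]
--     order = dict.fromkeys(k for k, _ in pairs)
--     return {k: [s for k2, s in pairs if k2 == k] for k in order}
-- ===== Notes on version B (the rewrite author's own statement) =====
-- stated objective: alternative
-- what changed: Replaced A's single dict-accumulation loop (membership test, insert-or-append per element) with a normalize-keys pass, an ordered key dedup (dict.fromkeys), and a per-key scan building each group via a comprehension.
import Mathlib
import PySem

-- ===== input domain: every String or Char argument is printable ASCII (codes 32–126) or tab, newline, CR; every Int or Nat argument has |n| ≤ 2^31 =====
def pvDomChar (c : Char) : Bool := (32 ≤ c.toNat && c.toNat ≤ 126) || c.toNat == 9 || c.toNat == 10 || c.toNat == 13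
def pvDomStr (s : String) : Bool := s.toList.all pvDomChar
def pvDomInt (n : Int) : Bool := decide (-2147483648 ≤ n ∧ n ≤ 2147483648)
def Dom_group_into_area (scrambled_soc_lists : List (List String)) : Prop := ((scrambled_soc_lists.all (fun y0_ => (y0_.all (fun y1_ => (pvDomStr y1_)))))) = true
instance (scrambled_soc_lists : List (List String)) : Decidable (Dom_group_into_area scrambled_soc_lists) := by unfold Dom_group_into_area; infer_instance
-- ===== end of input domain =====

-- B replaces A's single dict-accumulation pass by a normalize-keys pass, an ordered
-- key dedup, and a per-key scan building each group (alternative decomposition, not faster).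

-- the normalized area key: society[4].lower().strip()
def pvKey (society : List String) : String :=
  PySem.Str.strip (PySem.Str.lower (PySem.List.pyGetD society 4 ""))

-- ===== PORT A =====
def group_into_area (scrambled_soc_lists : List (List String)) : List (String × List (List String)) :=
  (scrambled_soc_lists.foldl (fun area_dict society =>
      let k := pvKey society
      if area_dict.contains k = false then area_dict.insert k [society]
      else area_dict.modify k [] (fun l => l ++ [society]))
    PySem.Dict.empty).items

-- ===== PORT B =====
def group_into_area_alt (scrambled_soc_lists : List (List String)) : List (String × List (List String)) :=
  let pairs := scrambled_soc_lists.map (fun society => (pvKey society, society))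
  (PySem.List.dedup (pairs.map (fun p => p.1))).map
    (fun k => (k, (pairs.filter (fun p => p.1 == k)).map (fun p => p.2)))

-- ===== PRECONDITION & SPEC =====
-- Python A indexes society[4], an IndexError when an inner list has fewer than 5 entries;
-- Pre_ admits exactly the inputs on which every society has at least 5 fields.
def Pre_group_into_area (scrambled_soc_lists : List (List String)) : Prop :=
  ∀ society ∈ scrambled_soc_lists, 5 ≤ society.length
instance (scrambled_soc_lists : List (List String)) : Decidable (Pre_group_into_area scrambled_soc_lists) := by unfold Pre_group_into_area; infer_instance

def pvWitness_group_into_area : List (List String) :=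
  [["a", "b", "c", "d", " East Side "], ["p", "q", "r", "s", "east side"], ["u", "v", "w", "x", "West"]]

def Spec_group_into_area (scrambled_soc_lists : List (List String)) (out : List (String × List (List String))) : Prop := out = group_into_area_alt scrambled_soc_lists
instance (scrambled_soc_lists : List (List String)) (out : List (String × List (List String))) : Decidable (Spec_group_into_area scrambled_soc_lists out) := by unfold Spec_group_into_area; infer_instance

-- ===== CLAIM (what is proved, stated in full; the proofs are below) =====
def Claim_equal_group_into_area : Prop := ∀ (scrambled_soc_lists : List (List String)), Dom_group_into_area scrambled_soc_lists → Pre_group_into_area scrambled_soc_lists → Spec_group_into_area scrambled_soc_lists (group_into_area scrambled_soc_lists)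

-- ===== LEMMAS AND PROOFS =====

-- A's branching loop body is, extensionally, a single Dict.modify-with-append step.
theorem pvStep_eq (d : PySem.Dict String (List (List String))) (s : List String) :
    (let k := pvKey s;
     if d.contains k = false then d.insert k [s] else d.modify k [] (fun l => l ++ [s]))
    = d.modify (pvKey s) [] (fun l => l ++ [s]) := by
  by_cases h : d.contains (pvKey s) = true
  · simp [h]
  · have h' : d.contains (pvKey s) = false := eq_false_of_ne_true h
    have hg : d.getD (pvKey s) ([] : List (List String)) = [] :=
      PySem.Dict.getD_of_not_contains d ([] : List (List String)) h'
    simp [h', PySem.Dict.modify, PySem.Dict.insert, hg]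

theorem pvFoldl_hom (xs : List (List String)) (d : PySem.Dict String (List (List String))) :
    (xs.foldl (fun d society =>
      let k := pvKey society
      if d.contains k = false then d.insert k [society]
      else d.modify k [] (fun l => l ++ [society])) d)
    = xs.foldl (fun d society => d.modify (pvKey society) [] (fun l => l ++ [society])) d := by
  induction xs generalizing d with
  | nil => rfl
  | cons s t ih => simp only [List.foldl_cons, pvStep_eq, ih]

theorem pvFoldl_eq (xs : List (List String)) :
    (xs.foldl (fun d society =>
      let k := pvKey society
      if d.contains k = false then d.insert k [society]
      else d.modify k [] (fun l => l ++ [society])) PySem.Dict.empty)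
    = (xs.map (fun society => (pvKey society, society))).foldl
        (fun d p => d.modify p.1 [] (fun l => l ++ [p.2])) PySem.Dict.empty := by
  rw [List.foldl_map]
  exact pvFoldl_hom xs PySem.Dict.empty

theorem pvAB (xs : List (List String)) : group_into_area xs = group_into_area_alt xs := by
  unfold group_into_area group_into_area_alt
  rw [pvFoldl_eq]
  set pairs := xs.map (fun society => (pvKey society, society)) with hp
  set D := pairs.foldl (fun d p => d.modify p.1 [] (fun l => l ++ [p.2])) PySem.Dict.empty with hD
  have hnd : D.keys.Nodup := by
    rw [hD]
    exact PySem.Dict.nodup_keys_foldl_modify_key pairs Prod.fst [] _ _ PySem.Dict.nodup_keys_empty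
  have hkeys : D.keys = PySem.List.dedup (pairs.map (fun p => p.1)) := by
    rw [hD, PySem.Dict.keys_foldl_modify_key, PySem.Dict.keys_empty, PySem.Set.update_nil_left,
      PySem.List.dedup_eq_ofList]
  rw [PySem.Dict.items_eq_map_keys D hnd [], hkeys]
  apply List.map_congr_left
  intro k hk
  have hval : D.getD k [] = (pairs.filter (fun p => p.1 == k)).map (fun p => p.2) := by
    rw [hD, PySem.Dict.getD_foldl_modify_append, PySem.Dict.getD_empty]
    simp
  rw [hval]

-- ===== VERDICT (by name: the statement is the Claim_ definition above) =====
theorem group_into_area_spec : Claim_equal_group_into_area := by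
  intro xs _ _
  unfold Spec_group_into_area
  exact pvAB xs
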